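-- pv_equiv track=rewrite | github.com/prarit0097/btc-tournament | btc_dashboard/services.py | _parse_timeframes
-- ===== SOURCE A (Python) =====
-- from typing import Any, Dict, List, Optional
--
-- DEFAULT_TIMEFRAMES = ["1m", "3m", "5m", "10m", "15m", "30m", "1h", "2h", "4h"]
--
-- def _parse_timeframes(value: Optional[str]) -> List[str]:
--     if not value:
--         return list(DEFAULT_TIMEFRAMES)
--     tokens: List[str] = []
--     for part in value.replace("|", ",").replace(";", ",").split(","):
--         token = part.strip()
--         if token:
--             tokens.append(token)
--     if not tokens:
--         return list(DEFAULT_TIMEFRAMES)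
--     seen = set()
--     ordered: List[str] = []
--     for token in tokens:
--         if token in seen:
--             continue
--         seen.add(token)
--         ordered.append(token)
--     return ordered
-- ===== SOURCE B (Python) =====
-- from typing import List, Optional
--
-- DEFAULT_TIMEFRAMES = ["1m", "3m", "5m", "10m", "15m", "30m", "1h", "2h", "4h"]
--
-- def _parse_timeframes(value: Optional[str]) -> List[str]:
--     # Single character-level scan (a small state machine): no replace/split/strip
--     # string pipeline at all. `buf` holds the stripped token built so far, `pend`
--     # holds whitespace that only becomes part of the token if a non-space char
--     # follows; delimiters flush `buf`, deduping by membership in the result list.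
--     if value is None:
--         return list(DEFAULT_TIMEFRAMES)
--     ordered: List[str] = []
--     buf = ""
--     pend = ""
--     for ch in value:
--         if ch in ",|;":
--             if buf and buf not in ordered:
--                 ordered.append(buf)
--             buf = ""
--             pend = ""
--         elif ch.isspace():
--             if buf:
--                 pend += ch
--         else:
--             buf += pend + ch
--             pend = ""
--     if buf and buf not in ordered:
--         ordered.append(buf)
--     return ordered if ordered else list(DEFAULT_TIMEFRAMES)
-- ===== Notes on version B (the rewrite author's own statement) =====
-- stated objective: alternative
-- what changed: Replaces A's string pipeline (two replace calls, split on ',', per-part strip, then a seen-set dedup pass) with a single character-level state machine that builds stripped tokens directly (buf + pending-whitespace buffers) and dedups by membership in the output list; the final empty check covers both of A's default paths.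
import Mathlib
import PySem

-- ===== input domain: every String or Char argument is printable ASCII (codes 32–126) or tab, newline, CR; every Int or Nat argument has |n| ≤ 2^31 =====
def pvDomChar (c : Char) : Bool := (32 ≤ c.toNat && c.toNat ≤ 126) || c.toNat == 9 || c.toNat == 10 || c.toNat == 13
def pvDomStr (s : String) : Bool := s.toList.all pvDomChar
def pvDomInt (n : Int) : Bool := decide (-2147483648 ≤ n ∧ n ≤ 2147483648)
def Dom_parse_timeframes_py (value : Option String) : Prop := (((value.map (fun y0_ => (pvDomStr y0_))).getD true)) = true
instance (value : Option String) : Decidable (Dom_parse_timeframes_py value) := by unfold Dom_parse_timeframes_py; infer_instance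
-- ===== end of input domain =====

-- B replaces A's replace/split/strip pipeline + seen-set dedup by a single character-level
-- state machine that builds stripped tokens directly and dedups by membership in the output list.


-- ===== PORT A =====
def pvDefaultTimeframes : List String := ["1m", "3m", "5m", "10m", "15m", "30m", "1h", "2h", "4h"]

-- sep is the literal "," ≠ "", so split? is always some; getD never substitutes
def pvParts (v : String) : List String :=
  (PySem.Str.split? (PySem.Str.replace (PySem.Str.replace v "|" ",") ";" ",") ",").getD []

def parse_timeframes_py (value : Option String) : List String :=
  match value with
  | none => pvDefaultTimeframes
  | some v =>
    if v = "" then pvDefaultTimeframes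
    else
      let tokens : List String := (pvParts v).foldl
        (fun acc part =>
          let token := PySem.Str.strip part
          if token ≠ "" then acc ++ [token] else acc) []
      if tokens = [] then pvDefaultTimeframes
      else
        let st := tokens.foldl
          (fun (p : PySem.Set String × List String) token =>
            if PySem.Set.contains p.1 token then p
            else (PySem.Set.add p.1 token, p.2 ++ [token]))
          (PySem.Set.empty, [])
        st.2

-- ===== PORT B =====
-- Source B's `ch in ",|;"` membership test
def pvIsDelim (c : Char) : Bool := c = ',' || c = '|' || c = ';'

-- Source B's loop body: state = (ordered, buf, pend); strings kept as List Char
def pvScanStep (st : List (List Char) × List Char × List Char) (c : Char) :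
    List (List Char) × List Char × List Char :=
  if pvIsDelim c then
    (if st.2.1 ≠ [] ∧ st.2.1 ∉ st.1 then st.1 ++ [st.2.1] else st.1, [], [])
  else if PySem.Chars.isspace c then
    (st.1, st.2.1, if st.2.1 ≠ [] then st.2.2 ++ [c] else st.2.2)
  else
    (st.1, st.2.1 ++ st.2.2 ++ [c], [])

def parse_timeframes_py_alt (value : Option String) : List String :=
  match value with
  | none => pvDefaultTimeframes
  | some v =>
    let st := v.toList.foldl pvScanStep ([], [], [])
    let ordered := if st.2.1 ≠ [] ∧ st.2.1 ∉ st.1 then st.1 ++ [st.2.1] else st.1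
    if ordered = [] then pvDefaultTimeframes else ordered.map String.ofList

-- ===== PRECONDITION & SPEC =====
def Spec_parse_timeframes_py (value : Option String) (out : List String) : Prop := out = parse_timeframes_py_alt value
instance (value : Option String) (out : List String) : Decidable (Spec_parse_timeframes_py value out) := by unfold Spec_parse_timeframes_py; infer_instance

-- ===== CLAIM =====
def Claim_equal_parse_timeframes_py : Prop := ∀ (value : Option String), Dom_parse_timeframes_py value → Spec_parse_timeframes_py value (parse_timeframes_py value)

-- ===== LEMMAS AND PROOFS =====

-- the combined effect of A's two single-char replaces
def pvSubst (c : Char) : Char := if c = '|' then ',' else if c = ';' then ',' else c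

-- the token stream the scanner will emit from state (buf, pend) on remaining input l
def pvTokensFrom : List Char → List Char → List Char → List (List Char)
  | buf, _, [] => if buf ≠ [] then [buf] else []
  | buf, pend, c :: t =>
    if pvIsDelim c then
      (if buf ≠ [] then buf :: pvTokensFrom [] [] t else pvTokensFrom [] [] t)
    else if PySem.Chars.isspace c then
      pvTokensFrom buf (if buf ≠ [] then pend ++ [c] else pend) t
    else
      pvTokensFrom (buf ++ pend ++ [c]) [] t

-- order-preserving dedup by membership in the output list
def pvDStep (o : List (List Char)) (t : List Char) : List (List Char) :=
  if t ∉ o then o ++ [t] else o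

-- A's two folds, named
def pvTokStep (acc : List String) (part : String) : List String :=
  let token := PySem.Str.strip part
  if token ≠ "" then acc ++ [token] else acc

def pvDedupStep (p : PySem.Set String × List String) (token : String) : PySem.Set String × List String :=
  if PySem.Set.contains p.1 token then p
  else (PySem.Set.add p.1 token, p.2 ++ [token])

-- A's token list factored: foldl with append-if is init ++ filtered map
lemma pvTok_eq (parts : List String) (acc : List String) :
    parts.foldl pvTokStep acc = acc ++ ((parts.map PySem.Str.strip).filter (fun t => t ≠ "")) := by
  induction parts generalizing acc with
  | nil => simp
  | cons p ps ih =>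
    simp only [List.foldl_cons, List.map_cons, List.filter_cons, pvTokStep]
    by_cases h : PySem.Str.strip p = ""
    · simp [h, ih]
    · simp [h, ih, List.append_assoc]

-- single-char replace is a map (fuel induction over PySem.Chars.replace.go)
lemma pvReplace_go_single (c d : Char) :
    ∀ (fuel : Nat) (l acc : List Char), l.length ≤ fuel →
      PySem.Chars.replace.go [c] [d] fuel l acc
        = acc.reverse ++ l.map (fun x => if x = c then d else x) := by
  intro fuel
  induction fuel with
  | zero =>
    intro l acc h
    have hl : l = [] := List.length_eq_zero_iff.mp (Nat.le_zero.mp h)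
    subst hl
    simp [PySem.Chars.replace.go]
  | succ n ih =>
    intro l acc h
    cases l with
    | nil => simp [PySem.Chars.replace.go]
    | cons x t =>
      simp only [PySem.Chars.replace.go]
      simp only [List.length_cons] at h
      by_cases hx : c = x
      · have hp : [c].isPrefixOf (x :: t) = true := by simp [List.isPrefixOf, hx]
        rw [if_pos hp]
        have hd : List.drop [c].length (x :: t) = t := by simp
        rw [hd, ih _ _ (by omega)]
        simp [hx.symm]
      · have hp : [c].isPrefixOf (x :: t) = false := by
          simp only [List.isPrefixOf, Bool.and_eq_false_iff]
          left; simpa using hx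
        rw [if_neg (by simp [hp])]
        rw [ih _ _ (by omega)]
        have hxc : ¬ (x = c) := fun h' => hx h'.symm
        simp [hxc]

lemma pvReplace_single (s : List Char) (c d : Char) :
    PySem.Chars.replace s [c] [d] = s.map (fun x => if x = c then d else x) := by
  simp [PySem.Chars.replace, pvReplace_go_single c d s.length s [] le_rfl]

-- single-char split is List.splitOnP (fuel induction over PySem.Chars.splitOn.go)
lemma pvSplitOn_go_single (c : Char) :
    ∀ (fuel : Nat) (l cur : List Char) (acc : List (List Char)), l.length ≤ fuel →
      PySem.Chars.splitOn.go [c] fuel l cur acc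
        = acc.reverse ++ (List.splitOnP (fun x => x == c) l).modifyHead (fun h => cur.reverse ++ h) := by
  intro fuel
  induction fuel with
  | zero =>
    intro l cur acc h
    have hl : l = [] := List.length_eq_zero_iff.mp (Nat.le_zero.mp h)
    subst hl
    simp [PySem.Chars.splitOn.go, List.splitOnP_nil]
  | succ n ih =>
    intro l cur acc h
    cases l with
    | nil => simp [PySem.Chars.splitOn.go, List.splitOnP_nil]
    | cons x t =>
      simp only [PySem.Chars.splitOn.go]
      simp only [List.length_cons] at h
      by_cases hx : c = x
      · have hp : [c].isPrefixOf (x :: t) = true := by simp [List.isPrefixOf, hx]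
        rw [if_pos hp]
        have hd : List.drop [c].length (x :: t) = t := by simp
        rw [hd, ih _ _ _ (by omega)]
        rw [List.splitOnP_cons]
        rw [if_pos (by simp [hx.symm])]
        simp [show (fun h : List Char => h) = id from rfl, List.modifyHead_id]
      · have hp : [c].isPrefixOf (x :: t) = false := by
          simp only [List.isPrefixOf, Bool.and_eq_false_iff]
          left; simpa using hx
        rw [if_neg (by simp [hp])]
        rw [ih _ _ _ (by omega)]
        rw [List.splitOnP_cons]
        rw [if_neg (by simp; exact fun h' => hx (Eq.symm h'))]
        rcases hsp : List.splitOnP (fun x => x == c) t with _ | ⟨h0, hs⟩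
        · exact absurd hsp (List.splitOnP_ne_nil _ _)
        · simp

lemma pvSplitOn_single (s : List Char) (c : Char) :
    PySem.Chars.splitOn s [c] = List.splitOnP (fun x => x == c) s := by
  have h := pvSplitOn_go_single c (s.length + 1) s [] [] (by omega)
  simp only [PySem.Chars.splitOn, h, List.reverse_nil, List.nil_append]
  rcases hsp : List.splitOnP (fun x => x == c) s with _ | ⟨h0, hs⟩
  · exact absurd hsp (List.splitOnP_ne_nil _ _)
  · simp

-- stripping drops a leading whitespace char
lemma pvStrip_cons_ws (c : Char) (h : PySem.Chars.isspace c = true) (l : List Char) :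
    PySem.Chars.strip (c :: l) = PySem.Chars.strip l := by
  simp [PySem.Chars.strip, PySem.Chars.lstrip, h]

-- a buffer flanked by non-space chars followed by pending whitespace strips to itself
lemma pvStrip_buf_pend (buf pend : List Char)
    (hws : pend.all PySem.Chars.isspace = true)
    (hbp : buf = [] → pend = [])
    (hhd : ∀ x, buf.head? = some x → PySem.Chars.isspace x = false)
    (hlast : ∀ x, buf.getLast? = some x → PySem.Chars.isspace x = false) :
    PySem.Chars.strip (buf ++ pend) = buf := by
  cases hb : buf with
  | nil => simp [hbp hb, PySem.Chars.strip, PySem.Chars.lstrip, PySem.Chars.rstrip]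
  | cons b0 bs =>
    subst hb
    have hb0 : PySem.Chars.isspace b0 = false := hhd b0 rfl
    have hl : PySem.Chars.lstrip (b0 :: bs ++ pend) = b0 :: bs ++ pend := by
      simp [PySem.Chars.lstrip, hb0]
    rw [PySem.Chars.strip, hl]
    have hpendrev : List.dropWhile PySem.Chars.isspace pend.reverse = [] := by
      rw [List.dropWhile_eq_nil_iff]
      intro x hx
      exact List.all_eq_true.mp hws x (List.mem_reverse.mp hx)
    rcases hbr : (b0 :: bs).reverse with _ | ⟨y, ys⟩
    · simp at hbr
    · have hy : (b0 :: bs).getLast? = some y := by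
        rw [List.getLast?_eq_head?_reverse, hbr]; rfl
      have hyws : PySem.Chars.isspace y = false := hlast y hy
      rw [PySem.Chars.rstrip, show b0 :: bs ++ pend = (b0 :: bs) ++ pend from rfl,
        List.reverse_append, List.dropWhile_append]
      rw [hpendrev]
      simp only [List.isEmpty_nil, if_true]
      rw [hbr, List.dropWhile_cons, hyws]
      simp [← hbr]

-- a delimiter char is exactly one that pvSubst sends to ','
lemma pvSubst_comma_iff (c : Char) : ((pvSubst c == ',') = true) = (pvIsDelim c = true) := by
  simp only [pvSubst, pvIsDelim]
  by_cases h1 : c = '|' <;> by_cases h2 : c = ';' <;> by_cases h3 : c = ',' <;>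
    simp [h1, h2, h3]

-- one step of splitOnP under the head-prefixing modifyHead
lemma pvSplit_head (c : Char) (t h0 : List Char) (hs : List (List Char))
    (hsp : List.splitOnP (fun x => x == ',') t = h0 :: hs) (buf pend : List Char) :
    ((List.splitOnP (fun x => x == ',') (c :: t)).modifyHead (fun h => buf ++ pend ++ h))
      = (if (c == ',') = true then (buf ++ pend) :: h0 :: hs
         else (buf ++ pend ++ (c :: h0)) :: hs) := by
  rw [List.splitOnP_cons, hsp]
  by_cases h : (c == ',') = true
  · simp [h]
  · simp [h]

-- the scanner's emitted tokens are A's pipeline tokens (split on substituted chars, strip, drop empties)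
lemma pvTokensFrom_spec :
    ∀ (l buf pend : List Char),
      pend.all PySem.Chars.isspace = true →
      (buf = [] → pend = []) →
      (∀ x, buf.head? = some x → PySem.Chars.isspace x = false) →
      (∀ x, buf.getLast? = some x → PySem.Chars.isspace x = false) →
      pvTokensFrom buf pend l
        = (((List.splitOnP (fun x => x == ',') (l.map pvSubst)).modifyHead
            (fun h => buf ++ pend ++ h)).map PySem.Chars.strip).filter (fun t => t ≠ []) := by
  intro l
  induction l with
  | nil =>
    intro buf pend hws hbp hhd hlast
    simp only [pvTokensFrom, List.map_nil, List.splitOnP_nil, List.modifyHead, List.map_cons,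
      List.map_nil, List.filter]
    rw [show buf ++ pend ++ [] = buf ++ pend by simp]
    rw [pvStrip_buf_pend buf pend hws hbp hhd hlast]
    by_cases hb : buf = [] <;> simp [hb]
  | cons c t ih =>
    intro buf pend hws hbp hhd hlast
    rcases hsp : List.splitOnP (fun x => x == ',') (t.map pvSubst) with _ | ⟨h0, hs⟩
    · exact absurd hsp (List.splitOnP_ne_nil _ _)
    have hmap : (c :: t).map pvSubst = pvSubst c :: t.map pvSubst := rfl
    by_cases hd : pvIsDelim c = true
    · have hsc : (pvSubst c == ',') = true := by rw [pvSubst_comma_iff]; exact hd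
      rw [pvTokensFrom, if_pos hd, hmap, pvSplit_head _ _ _ _ hsp, if_pos hsc]
      rw [ih [] [] rfl (fun _ => rfl) (by intro x h; cases h) (by intro x h; cases h), hsp]
      simp only [List.modifyHead, List.nil_append, List.map_cons, List.filter_cons]
      rw [pvStrip_buf_pend buf pend hws hbp hhd hlast]
      by_cases hb : buf = [] <;> simp [hb]
    · have hsc : (pvSubst c == ',') = false := by
        rw [Bool.eq_false_iff]; intro h; rw [pvSubst_comma_iff] at h; exact absurd h (by simp [hd])
      have hcc : pvSubst c = c := by
        simp only [pvSubst, pvIsDelim] at hd ⊢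
        by_cases h1 : c = '|' <;> by_cases h2 : c = ';' <;> simp_all
      have hscc : (c == ',') = false := by rw [← hcc]; exact hsc
      by_cases hw : PySem.Chars.isspace c = true
      · -- whitespace char
        rw [pvTokensFrom, if_neg hd, if_pos hw]
        by_cases hb : buf = []
        · have hp0 : pend = [] := hbp hb
          subst hb; subst hp0
          rw [if_neg (by simp)]
          rw [ih [] [] rfl (fun _ => rfl) (by intro x h; cases h) (by intro x h; cases h), hsp]
          rw [hmap, hcc, pvSplit_head _ _ _ _ hsp, if_neg (by simp [hscc])]
          simp only [List.modifyHead, List.nil_append, List.map_cons, List.filter_cons]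
          rw [pvStrip_cons_ws c hw h0]
        · rw [if_pos hb]
          rw [ih buf (pend ++ [c])
            (by rw [List.all_append]; simp [hws, hw])
            (fun h => absurd h hb) hhd hlast, hsp]
          rw [hmap, hcc, pvSplit_head _ _ _ _ hsp, if_neg (by simp [hscc])]
          simp only [List.modifyHead]
          rw [show buf ++ (pend ++ [c]) ++ h0 = buf ++ pend ++ (c :: h0) by simp]
      · -- ordinary char
        rw [pvTokensFrom, if_neg hd, if_neg hw]
        rw [ih (buf ++ pend ++ [c]) [] rfl (fun h => by simp at h)
          (by
            intro x hx
            cases hb : buf with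
            | nil =>
              have hp0 : pend = [] := hbp hb
              rw [hb, hp0] at hx
              simp at hx
              rw [← hx]; exact Bool.eq_false_iff.mpr hw
            | cons b0 bs =>
              rw [hb] at hx
              simp only [List.cons_append, List.head?_cons, Option.some.injEq] at hx
              exact hhd x (by rw [hb, ← hx]; rfl))
          (by
            intro x hx
            rw [List.getLast?_concat] at hx
            cases hx
            exact Bool.eq_false_iff.mpr hw), hsp]
        rw [hmap, hcc, pvSplit_head _ _ _ _ hsp, if_neg (by simp [hscc])]
        simp only [List.modifyHead]
        simp

-- the scanner fold plus final flush equals folding the dedup step over the emitted tokens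
lemma pvScan_eq_dedup :
    ∀ (l : List Char) (ordered : List (List Char)) (buf pend : List Char),
      (let st := l.foldl pvScanStep (ordered, buf, pend)
       if st.2.1 ≠ [] ∧ st.2.1 ∉ st.1 then st.1 ++ [st.2.1] else st.1)
        = (pvTokensFrom buf pend l).foldl pvDStep ordered := by
  intro l
  induction l with
  | nil =>
    intro ordered buf pend
    simp only [List.foldl_nil, pvTokensFrom]
    by_cases hb : buf = []
    · simp [hb]
    · simp only [hb, ne_eq, not_false_eq_true, if_true, List.foldl_cons, List.foldl_nil, pvDStep]
      by_cases hm : buf ∈ ordered <;> simp [hm, hb]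
  | cons c t ih =>
    intro ordered buf pend
    simp only [List.foldl_cons, pvScanStep, pvTokensFrom]
    by_cases hd : pvIsDelim c = true
    · simp only [hd, if_true]
      by_cases hb : buf = []
      · simp only [hb, ne_eq, not_true_eq_false, false_and, if_false]
        exact ih ordered [] []
      · simp only [hb, ne_eq, not_false_eq_true, true_and, if_true, List.foldl_cons]
        by_cases hm : buf ∈ ordered
        · simp only [hm, not_true_eq_false, if_false, pvDStep, hm, not_true_eq_false, if_false]
          exact ih ordered [] []
        · simp only [hm, not_false_eq_true, if_true, pvDStep, hm, not_false_eq_true, if_true]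
          exact ih (ordered ++ [buf]) [] []
    · simp only [hd, if_false]
      by_cases hw : PySem.Chars.isspace c = true
      · simp only [hw, if_true]
        exact ih ordered buf _
      · simp only [hw, if_false]
        exact ih ordered (buf ++ pend ++ [c]) []

-- String.ofList is injective
lemma pvOfList_inj : Function.Injective String.ofList := by
  intro p q h
  have : (String.ofList p).toList = (String.ofList q).toList := by rw [h]
  simpa [String.toList_ofList] using this

-- A's set-based dedup over the string images equals the list-membership dedup over the char lists
lemma pvContains_mem (L : List String) (x : String) :
    PySem.Set.contains L x = true ↔ x ∈ L := by
  simp [PySem.Set.contains]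

lemma pvDedup_bridge :
    ∀ (toks : List (List Char)) (seen : PySem.Set String) (orderedC : List (List Char)),
      (∀ s, PySem.Set.contains seen s = true ↔ s ∈ orderedC.map String.ofList) →
      ((toks.map String.ofList).foldl pvDedupStep (seen, orderedC.map String.ofList)).2
        = (toks.foldl pvDStep orderedC).map String.ofList := by
  intro toks
  induction toks with
  | nil => intro seen orderedC hinv; simp
  | cons t ts ih =>
    intro seen orderedC hinv
    simp only [List.map_cons, List.foldl_cons, pvDedupStep, pvDStep]
    by_cases hm : t ∈ orderedC
    · have hc : PySem.Set.contains seen (String.ofList t) = true :=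
        (hinv _).mpr (List.mem_map_of_mem hm)
      simp only [hc, if_true, hm, not_true_eq_false, if_false]
      exact ih seen orderedC hinv
    · have hc : PySem.Set.contains seen (String.ofList t) = false := by
        rw [Bool.eq_false_iff]
        intro h
        exact hm ((List.mem_map_of_injective pvOfList_inj).mp ((hinv _).mp h))
      have hadd : PySem.Set.add seen (String.ofList t) = seen ++ [String.ofList t] := by
        have hc' : List.contains seen (String.ofList t) = false := hc
        unfold PySem.Set.add
        rw [show PySem.Set.contains seen (String.ofList t)
            = List.contains seen (String.ofList t) from rfl, hc']
        simp
      simp only [hc, Bool.false_eq_true, if_false, hm, not_false_eq_true, if_true]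
      have hstep : (orderedC.map String.ofList) ++ [String.ofList t]
          = (orderedC ++ [t]).map String.ofList := by simp
      rw [hstep]
      refine ih (PySem.Set.add seen (String.ofList t)) (orderedC ++ [t]) ?_
      intro s
      rw [hadd, pvContains_mem]
      constructor
      · intro hgoal
        rcases List.mem_append.mp hgoal with h' | h'
        · have := (hinv s).mp ((pvContains_mem _ _).mpr h')
          rw [List.map_append]
          exact List.mem_append.mpr (Or.inl this)
        · rw [List.map_append]
          refine List.mem_append.mpr (Or.inr ?_)
          simpa using h'
      · intro hgoal
        rw [List.map_append] at hgoal
        apply List.mem_append.mpr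
        rcases List.mem_append.mp hgoal with h' | h'
        · exact Or.inl ((pvContains_mem _ _).mp ((hinv s).mpr h'))
        · right; simpa using h'

-- the dedup fold never shortens its accumulator
lemma pvDStep_len (ts : List (List Char)) (o : List (List Char)) :
    o.length ≤ (ts.foldl pvDStep o).length := by
  induction ts generalizing o with
  | nil => simp
  | cons t ts ih =>
    refine le_trans ?_ (ih (pvDStep o t))
    by_cases hm : t ∈ o <;> simp [pvDStep, hm]

lemma pvDStep_ne_nil (t : List Char) (ts : List (List Char)) :
    (t :: ts).foldl pvDStep [] ≠ [] := by
  intro h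
  have h1 : pvDStep [] t = [t] := by simp [pvDStep]
  rw [List.foldl_cons, h1] at h
  have := pvDStep_len ts [t]
  rw [h] at this
  simp at this

-- "" is ofList of [] only
lemma pvOfList_eq_empty_iff (p : List Char) : (String.ofList p = "") ↔ p = [] := by
  constructor
  · intro h
    have := congrArg String.toList h
    simpa [String.toList_ofList] using this
  · intro h; rw [h]

-- A's parts, on the char level
lemma pvParts_eq (v : String) :
    pvParts v = (List.splitOnP (fun x => x == ',') (v.toList.map pvSubst)).map String.ofList := by
  have hbar : ("|" : String).toList = ['|'] := by decide
  have hsemi : (";" : String).toList = [';'] := by decide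
  have hcomma : ("," : String).toList = [','] := by decide
  simp only [pvParts, PySem.Str.split?, PySem.Str.replace, PySem.Chars.split?,
    String.toList_ofList, hbar, hsemi, hcomma]
  rw [if_neg (by simp)]
  simp only [Option.map_some, Option.getD_some]
  rw [pvReplace_single, pvReplace_single, List.map_map, pvSplitOn_single]
  have hco : ((fun x => if x = ';' then ',' else x) ∘ fun x => if x = '|' then ',' else x) = pvSubst := by
    funext c
    simp only [Function.comp, pvSubst]
    by_cases h1 : c = '|' <;> by_cases h2 : c = ';' <;> simp [h1, h2]
  rw [hco]

-- filtering the string images is the image of filtering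
lemma pvFilter_map_ofList (l : List (List Char)) :
    ((l.map String.ofList).filter (fun t => t ≠ "")) = (l.filter (fun t => t ≠ [])).map String.ofList := by
  induction l with
  | nil => rfl
  | cons p ps ih =>
    simp only [List.map_cons, List.filter_cons]
    by_cases hp : p = []
    · have h1 : (decide (String.ofList p ≠ "")) = false := by
        simp [hp, pvOfList_eq_empty_iff]
      have h2 : (decide (p ≠ [])) = false := by simp [hp]
      rw [h1, h2]
      simp only [Bool.false_eq_true, if_false]
      exact ih
    · have h1 : (decide (String.ofList p ≠ "")) = true := by
        rw [decide_eq_true_iff]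
        exact fun h => hp ((pvOfList_eq_empty_iff p).mp h)
      have h2 : (decide (p ≠ [])) = true := by simp [hp]
      rw [h1, h2]
      simp only [if_true, List.map_cons]
      rw [ih]

-- ===== VERDICT =====
theorem parse_timeframes_py_spec : Claim_equal_parse_timeframes_py := by
  intro value _
  unfold Spec_parse_timeframes_py
  cases value with
  | none => rfl
  | some v =>
    -- name the char-level token list
    set tc : List (List Char) :=
      ((List.splitOnP (fun x => x == ',') (v.toList.map pvSubst)).map PySem.Chars.strip).filter
        (fun t => t ≠ []) with htc
    have htok : pvTokensFrom [] [] v.toList = tc := by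
      rw [pvTokensFrom_spec v.toList [] [] rfl (fun _ => rfl)
        (by intro x h; cases h) (by intro x h; cases h)]
      rw [htc]
      congr 1
      rcases hsp : List.splitOnP (fun x => x == ',') (v.toList.map pvSubst) with _ | ⟨h0, hs⟩
      · exact absurd hsp (List.splitOnP_ne_nil _ _)
      · simp
    -- B's ordered list
    have hB : (let st := v.toList.foldl pvScanStep ([], [], [])
        if st.2.1 ≠ [] ∧ st.2.1 ∉ st.1 then st.1 ++ [st.2.1] else st.1)
        = tc.foldl pvDStep [] := by
      rw [pvScan_eq_dedup v.toList [] [] [], htok]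
    -- A's token list (string level)
    have hAtok : (pvParts v).foldl pvTokStep [] = tc.map String.ofList := by
      rw [pvTok_eq, List.nil_append, pvParts_eq, List.map_map]
      have : (List.map (PySem.Str.strip ∘ String.ofList)
          (List.splitOnP (fun x => x == ',') (v.toList.map pvSubst)))
          = ((List.splitOnP (fun x => x == ',') (v.toList.map pvSubst)).map PySem.Chars.strip).map
              String.ofList := by
        rw [List.map_map]
        congr 1
        funext p
        simp [Function.comp, PySem.Str.strip, String.toList_ofList]
      rw [this, pvFilter_map_ofList, htc]
    by_cases hv : v = ""
    · -- A takes the empty guard; B scans nothing and falls back to the default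
      subst hv
      simp only [parse_timeframes_py, parse_timeframes_py_alt]
      rw [show ("" : String).toList = [] from rfl]
      simp
    · simp only [parse_timeframes_py, parse_timeframes_py_alt, if_neg hv]
      rw [show (fun acc part =>
          let token := PySem.Str.strip part
          if token ≠ "" then acc ++ [token] else acc) = pvTokStep from rfl]
      rw [show (fun (p : PySem.Set String × List String) token =>
          if PySem.Set.contains p.1 token then p
          else (PySem.Set.add p.1 token, p.2 ++ [token])) = pvDedupStep from rfl]
      rw [hAtok]
      simp only at hB
      rw [hB]
      cases htcc : tc with
      | nil => simp
      | cons t ts =>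
        have htne : tc.map String.ofList ≠ [] := by rw [htcc]; simp
        have hone : tc.foldl pvDStep [] ≠ [] := by rw [htcc]; exact pvDStep_ne_nil t ts
        rw [← htcc]
        rw [if_neg htne, if_neg hone]
        have := pvDedup_bridge tc PySem.Set.empty []
          (by intro s; simp [PySem.Set.contains, PySem.Set.empty])
        simpa using this
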